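-- pv_equiv track=rewrite | github.com/timg4/NLP-Group-23 | archive/future_work/baselines/enhanced_rulebased_ner.py | _entities_to_bio
-- ===== SOURCE A (Python) =====
-- from typing import List, Dict, Tuple
--
-- def _entities_to_bio(num_tokens: int, entities: List[Tuple[int, int, str]]) -> List[str]:
--     """Convert entity spans to BIO tags"""
--     tags = ['O'] * num_tokens
--
--     # Sort entities by start position, then by length (longest first) to handle overlaps
--     sorted_entities = sorted(entities, key=lambda x: (x[0], -(x[1] - x[0])))
--
--     for start, end, ent_type in sorted_entities:
--         # Skip if already tagged (keep first/longest match)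
--         if tags[start] != 'O':
--             continue
--
--         # Assign BIO tags
--         tags[start] = f'B-{ent_type}'
--         for i in range(start + 1, end + 1):
--             if i < num_tokens and tags[i] == 'O':
--                 tags[i] = f'I-{ent_type}'
--
--     return tags
-- ===== SOURCE B (Python) =====
-- def _entities_to_bio(num_tokens, entities):
--     """Convert entity spans to BIO tags: select the disjoint surviving spans in
--     one pass over the sorted list, then emit the tag list segment by segment
--     (each output cell is produced exactly once).  A span whose start lies
--     outside [0, num_tokens) is rejected with IndexError instead of silently
--     wrapping around like a negative Python list index."""
--     kept = []
--     cur_max = None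
--     for s, e, t in sorted(entities, key=lambda x: (x[0], -(x[1] - x[0]))):
--         if not 0 <= s < num_tokens:
--             raise IndexError('entity start out of token range')
--         if cur_max is None or s > cur_max:
--             kept.append((s, e, t))
--             cur_max = max(s, e)
--     out = []
--     pos = 0
--     for s, e, t in kept:
--         out.extend(['O'] * (s - pos))
--         out.append('B-' + t)
--         fe = min(e, num_tokens - 1)
--         out.extend(['I-' + t] * (fe - s))
--         pos = max(s, fe) + 1
--     out.extend(['O'] * (num_tokens - pos))
--     return out
-- ===== Notes on version B (the rewrite author's own statement) =====
-- stated objective: alternative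
-- what changed: A mutates a pre-built tag array, re-scanning every span's full range and skipping already-tagged cells; B selects the disjoint surviving spans in one linear pass over the sorted list and then emits each output cell exactly once, segment by segment (B validates span starts instead of letting negative ones wrap around).
-- outside the precondition, e.g. on _entities_to_bio(3, [(-1, 2, 'X')]): A returns ['I-X', 'I-X', 'B-X'], B raises IndexError; on _entities_to_bio(2, [(-1, -1, 'X'), (1, 5, 'Y')]): A returns ['O', 'B-X'], B raises IndexError
import Mathlib
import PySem

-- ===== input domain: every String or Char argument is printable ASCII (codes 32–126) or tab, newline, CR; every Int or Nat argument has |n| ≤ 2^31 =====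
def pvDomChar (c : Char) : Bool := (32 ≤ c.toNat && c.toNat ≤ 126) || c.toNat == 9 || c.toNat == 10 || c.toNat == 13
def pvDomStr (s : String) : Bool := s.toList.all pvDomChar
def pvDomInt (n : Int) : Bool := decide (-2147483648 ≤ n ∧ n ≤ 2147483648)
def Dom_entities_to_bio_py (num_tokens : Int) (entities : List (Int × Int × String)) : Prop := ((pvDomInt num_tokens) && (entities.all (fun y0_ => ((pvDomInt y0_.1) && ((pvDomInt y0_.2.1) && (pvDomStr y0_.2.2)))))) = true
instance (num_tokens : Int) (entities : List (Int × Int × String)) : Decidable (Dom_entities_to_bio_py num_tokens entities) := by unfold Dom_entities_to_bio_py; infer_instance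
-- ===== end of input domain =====

-- B selects the disjoint surviving spans in one pass and emits each output cell once,
-- instead of A's repeated range re-scans over a mutable tag array.


-- ===== PORT A =====
-- Literal port of A.  tags[start] / tags[i] are read with pyGetD (default "") and written with
-- pySetD: exact wherever Python does not raise; Pre_ excludes the raising inputs.
def entities_to_bio_py (num_tokens : Int) (entities : List (Int × Int × String)) : List String :=
  let tags := PySem.List.pyRepeat ["O"] num_tokens
  let sorted_entities :=
    PySem.List.sorted2 entities (fun x => x.1) (fun x => -(x.2.1 - x.1))
  sorted_entities.foldl (fun tags ent =>
    if PySem.List.pyGetD tags ent.1 "" ≠ "O" then tags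
    else
      let tags1 := PySem.List.pySetD tags ent.1 ("B-" ++ ent.2.2)
      (PySem.List.pyRange (ent.1 + 1) (ent.2.1 + 1) 1).foldl (fun tgs i =>
        if i < num_tokens ∧ PySem.List.pyGetD tgs i "" = "O"
        then PySem.List.pySetD tgs i ("I-" ++ ent.2.2) else tgs) tags1) tags

-- ===== PORT B =====
-- the kept-span selection loop of Source B (cur_max is the running max(s, e) over kept spans).
-- On a span whose start is outside [0, num_tokens) Python B RAISES IndexError — an input
-- outside Pre_; the port drops the span there (exact on every input of Pre_).
def ebKeep (num_tokens : Int) (curMax : Option Int) :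
    List (Int × Int × String) → List (Int × Int × String)
  | [] => []
  | x :: rest =>
    if 0 ≤ x.1 ∧ x.1 < num_tokens then
      match curMax with
      | none => x :: ebKeep num_tokens (some (max x.1 x.2.1)) rest
      | some m => if x.1 > m then x :: ebKeep num_tokens (some (max x.1 x.2.1)) rest
                  else ebKeep num_tokens (some m) rest
    else ebKeep num_tokens curMax rest

-- the emission loop of Source B: O-gap, B tag, I run, recurse from the next free cell
def ebEmit (num_tokens : Int) : Int → List (Int × Int × String) → List String
  | pos, [] => List.replicate (num_tokens - pos).toNat "O"
  | pos, (s, e, t) :: rest =>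
    let fe := min e (num_tokens - 1)
    List.replicate (s - pos).toNat "O"
      ++ ("B-" ++ t) :: List.replicate (fe - s).toNat ("I-" ++ t)
      ++ ebEmit num_tokens (max s fe + 1) rest

def entities_to_bio_py_alt (num_tokens : Int) (entities : List (Int × Int × String)) : List String :=
  let spans := PySem.List.sorted2 entities (fun x => x.1) (fun x => -(x.2.1 - x.1))
  ebEmit num_tokens 0 (ebKeep num_tokens none spans)

-- ===== PRECONDITION & SPEC =====
-- Pre_ restricts every entity start to [0, num_tokens): for starts ≥ num_tokens or
-- < -num_tokens A raises IndexError, and for negative in-range starts A tags tokens counted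
-- from the end via Python's negative-index wraparound, an accident of list indexing that no
-- caller of a BIO converter relies on; B raises IndexError on every span starting outside
-- the token range, so B itself returns no value on any of the excluded inputs.
def Pre_entities_to_bio_py (num_tokens : Int) (entities : List (Int × Int × String)) : Prop :=
  ∀ x ∈ entities, 0 ≤ x.1 ∧ x.1 < num_tokens
instance (num_tokens : Int) (entities : List (Int × Int × String)) : Decidable (Pre_entities_to_bio_py num_tokens entities) := by unfold Pre_entities_to_bio_py; infer_instance
def pvWitness_entities_to_bio_py : Int × (List (Int × Int × String)) :=
  (10, [(2, 3, "PER"), (5, 5, "LOC"), (3, 7, "ORG"), (6, 9, "GPE")])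

def Spec_entities_to_bio_py (num_tokens : Int) (entities : List (Int × Int × String)) (out : List String) : Prop := out = entities_to_bio_py_alt num_tokens entities
instance (num_tokens : Int) (entities : List (Int × Int × String)) (out : List String) : Decidable (Spec_entities_to_bio_py num_tokens entities out) := by unfold Spec_entities_to_bio_py; infer_instance

-- ===== CLAIM (what is proved, stated in full; the proofs are below) =====
def Claim_equal_entities_to_bio_py : Prop := ∀ (num_tokens : Int) (entities : List (Int × Int × String)), Dom_entities_to_bio_py num_tokens entities → Pre_entities_to_bio_py num_tokens entities → Spec_entities_to_bio_py num_tokens entities (entities_to_bio_py num_tokens entities)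

-- ===== LEMMAS AND PROOFS =====

-- the tag a cell receives from a chain of disjoint kept spans (first covering span wins)
def covTag (c : Int) : List (Int × Int × String) → String
  | [] => "O"
  | (s, e, t) :: ks =>
    if c < s then "O" else if c = s then "B-" ++ t
    else if c ≤ e then "I-" ++ t else covTag c ks

-- kept spans form a chain: starts strictly above the previous running max, inside [0, n)
def ChainFrom (n : Int) : Int → List (Int × Int × String) → Prop
  | _, [] => True
  | m, (s, e, _) :: ks => m < s ∧ s < n ∧ ChainFrom n (max s e) ks



-- A's fold step, named for the proofs (definitionally the lambda in the port)
def aStep (n : Int) (tags : List String) (ent : Int × Int × String) : List String :=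
  if PySem.List.pyGetD tags ent.1 "" ≠ "O" then tags
  else
    let tags1 := PySem.List.pySetD tags ent.1 ("B-" ++ ent.2.2)
    (PySem.List.pyRange (ent.1 + 1) (ent.2.1 + 1) 1).foldl (fun tgs i =>
      if i < n ∧ PySem.List.pyGetD tgs i "" = "O"
      then PySem.List.pySetD tgs i ("I-" ++ ent.2.2) else tgs) tags1

-- the tag list as a function of the cell index
def mapRange (n : Nat) (f : Int → String) : List String :=
  (List.range n).map (fun i : Nat => f ((i : Nat) : Int))

lemma portA_eq (n : Int) (ents : List (Int × Int × String)) :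
    entities_to_bio_py n ents
      = (PySem.List.sorted2 ents (fun x => x.1) (fun x => -(x.2.1 - x.1))).foldl (aStep n)
          (List.replicate n.toNat "O") := by
  simp only [entities_to_bio_py, PySem.List.pyRepeat_singleton]
  rfl

lemma B_ne_O (t : String) : ("B-" ++ t) ≠ "O" := by
  intro h
  have h2 := congrArg String.length h
  rw [String.length_append] at h2
  have e1 : ("B-" : String).length = 2 := rfl
  have e2 : ("O" : String).length = 1 := rfl
  omega

lemma I_ne_O (t : String) : ("I-" ++ t) ≠ "O" := by
  intro h
  have h2 := congrArg String.length h
  rw [String.length_append] at h2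
  have e1 : ("I-" : String).length = 2 := rfl
  have e2 : ("O" : String).length = 1 := rfl
  omega

lemma mapRange_congr (n : Nat) (f g : Int → String)
    (h : ∀ c : Int, 0 ≤ c → c < (n : Int) → f c = g c) : mapRange n f = mapRange n g := by
  unfold mapRange
  apply List.map_congr_left
  intro i hi
  simp only [List.mem_range] at hi
  exact h ((i : Nat) : Int) (by omega) (by omega)

lemma replicate_eq_mapRange (n : Nat) (v : String) :
    List.replicate n v = mapRange n (fun _ => v) := by
  unfold mapRange
  rw [List.map_const', List.length_range]

lemma getD_mapRange (f : Int → String) (n : Nat) (c : Int) (d : String)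
    (h0 : 0 ≤ c) (h1 : c < (n : Int)) :
    PySem.List.pyGetD (mapRange n f) c d = f c := by
  unfold mapRange
  rw [PySem.List.pyGetD_eq_getElem _ d h0 (by
    rw [List.length_map, List.length_range]; exact h1)]
  rw [List.getElem_map, List.getElem_range]
  congr 1
  omega

lemma setD_mapRange (f : Int → String) (n : Nat) (a : Int) (v : String) (h0 : 0 ≤ a) :
    PySem.List.pySetD (mapRange n f) a v
      = mapRange n (fun c => if c = a then v else f c) := by
  unfold mapRange
  rw [PySem.List.pySetD_of_nonneg _ _ h0]
  apply List.ext_getElem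
  · simp
  intro k h1 h2
  rw [List.getElem_set, List.getElem_map, List.getElem_map, List.getElem_range]
  show (if a.toNat = k then v else f ((k : Nat) : Int))
      = if ((k : Nat) : Int) = a then v else f ((k : Nat) : Int)
  by_cases hk : ((k : Nat) : Int) = a
  · rw [if_pos (by omega), if_pos hk]
  · rw [if_neg (by omega), if_neg hk]

-- ---- sortedness of sorted2 on the first key ----

def ebLt (a b : Int × Int × String) : Bool :=
  decide (a.1 < b.1) || (!decide (b.1 < a.1) && decide (-(a.2.1 - a.1) < -(b.2.1 - b.1)))

lemma ebLt_asym (a b : Int × Int × String) (h : ebLt a b = true) : ebLt b a = false := by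
  simp only [ebLt, Bool.or_eq_true, Bool.and_eq_true, Bool.not_eq_true', decide_eq_true_eq,
    decide_eq_false_iff_not, Bool.or_eq_false_iff, Bool.and_eq_false_iff,
    Bool.not_eq_false'] at h ⊢
  omega

lemma ebLt_trans' (a b c : Int × Int × String) (h1 : ebLt a b = true) (h2 : ebLt c b = false) :
    ebLt c a = false := by
  simp only [ebLt, Bool.or_eq_true, Bool.and_eq_true, Bool.not_eq_true', decide_eq_true_eq,
    decide_eq_false_iff_not, Bool.or_eq_false_iff, Bool.and_eq_false_iff,
    Bool.not_eq_false'] at h1 h2 ⊢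
  omega

lemma pairwise_insertBy (x : Int × Int × String) (ys : List (Int × Int × String))
    (h : List.Pairwise (fun a b => ebLt b a = false) ys) :
    List.Pairwise (fun a b => ebLt b a = false) (PySem.List.insertBy ebLt x ys) := by
  induction ys with
  | nil => simp [PySem.List.insertBy]
  | cons y ys ih =>
    rw [show PySem.List.insertBy ebLt x (y :: ys)
        = if ebLt x y then x :: y :: ys else y :: PySem.List.insertBy ebLt x ys from rfl]
    rcases h with _ | ⟨hy, hys⟩
    by_cases hxy : ebLt x y = true
    · rw [if_pos hxy]
      refine List.Pairwise.cons ?_ (List.Pairwise.cons hy hys)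
      intro z hz
      rcases List.mem_cons.mp hz with rfl | hz
      · exact ebLt_asym x z hxy
      · exact ebLt_trans' x y z hxy (hy z hz)
    · rw [if_neg hxy]
      refine List.Pairwise.cons ?_ (ih hys)
      intro z hz
      rcases (PySem.List.insertBy_mem_iff ebLt x z ys).mp hz with hz | hz
      · subst hz; exact Bool.eq_false_iff.mpr hxy
      · exact hy z hz

lemma pairwise_foldl_insertBy (xs : List (Int × Int × String)) :
    ∀ (acc : List (Int × Int × String)), List.Pairwise (fun a b => ebLt b a = false) acc →
    List.Pairwise (fun a b => ebLt b a = false)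
      (xs.foldl (fun acc x => PySem.List.insertBy ebLt x acc) acc) := by
  induction xs with
  | nil => intro acc h; exact h
  | cons x xs ih => intro acc h; exact ih _ (pairwise_insertBy x acc h)

lemma sorted2_pairwise_start (xs : List (Int × Int × String)) :
    List.Pairwise (fun a b : Int × Int × String => a.1 ≤ b.1)
      (PySem.List.sorted2 xs (fun x => x.1) (fun x => -(x.2.1 - x.1))) := by
  have h : PySem.List.sorted2 xs (fun x => x.1) (fun x => -(x.2.1 - x.1))
      = xs.foldl (fun acc x => PySem.List.insertBy ebLt x acc) [] := rfl
  rw [h]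
  refine (pairwise_foldl_insertBy xs [] (by simp)).imp ?_
  intro a b hab
  simp only [ebLt, Bool.or_eq_false_iff, decide_eq_false_iff_not] at hab
  omega


lemma covTag_cons_lt (c s e : Int) (t : String) (ks : List (Int × Int × String))
    (hc : c < s) : covTag c ((s, e, t) :: ks) = "O" := by
  simp only [covTag]
  rw [if_pos hc]

lemma covTag_cons_self (s e : Int) (t : String) (ks : List (Int × Int × String)) :
    covTag s ((s, e, t) :: ks) = "B-" ++ t := by
  simp [covTag]

lemma covTag_cons_mid (c s e : Int) (t : String) (ks : List (Int × Int × String))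
    (h1 : s < c) (h2 : c ≤ e) : covTag c ((s, e, t) :: ks) = "I-" ++ t := by
  simp only [covTag]
  rw [if_neg (by omega), if_neg (by omega), if_pos h2]

lemma covTag_cons_gt (c s e : Int) (t : String) (ks : List (Int × Int × String))
    (h1 : s < c) (h2 : e < c) : covTag c ((s, e, t) :: ks) = covTag c ks := by
  simp only [covTag]
  rw [if_neg (by omega), if_neg (by omega), if_neg (by omega)]

lemma ebKeep_cons_keep (n s e : Int) (t : String) (m : Int)
    (rest : List (Int × Int × String)) (h0 : 0 ≤ s) (h1 : s < n) (hm : m < s) :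
    ebKeep n (some m) ((s, e, t) :: rest)
      = (s, e, t) :: ebKeep n (some (max s e)) rest := by
  show (if 0 ≤ s ∧ s < n then
      if s > m then (s, e, t) :: ebKeep n (some (max s e)) rest
      else ebKeep n (some m) rest
    else ebKeep n (some m) rest) = _
  rw [if_pos ⟨h0, h1⟩, if_pos (by omega)]

lemma ebKeep_cons_skip (n s e : Int) (t : String) (m : Int)
    (rest : List (Int × Int × String)) (h0 : 0 ≤ s) (h1 : s < n) (hm : ¬ m < s) :
    ebKeep n (some m) ((s, e, t) :: rest) = ebKeep n (some m) rest := by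
  show (if 0 ≤ s ∧ s < n then
      if s > m then (s, e, t) :: ebKeep n (some (max s e)) rest
      else ebKeep n (some m) rest
    else ebKeep n (some m) rest) = _
  rw [if_pos ⟨h0, h1⟩, if_neg (by omega)]

-- ---- A's inner fill loop, on tags given as a function of the cell index ----

lemma fillLemma (n : Int) (t : String) : ∀ (k : Nat) (a b : Int) (g : Int → String),
    (b - a).toNat = k → 0 ≤ a →
    (∀ c, a ≤ c → c < n → g c = "O") →
    (PySem.List.pyRange a b 1).foldl (fun tgs i =>
        if i < n ∧ PySem.List.pyGetD tgs i "" = "O"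
        then PySem.List.pySetD tgs i ("I-" ++ t) else tgs)
      (mapRange n.toNat g)
    = mapRange n.toNat (fun c =>
        if a ≤ c ∧ c < b ∧ c < n then "I-" ++ t else g c) := by
  intro k
  induction k with
  | zero =>
    intro a b g hk h0 hg
    rw [PySem.List.pyRange_one_eq_nil (by omega)]
    simp only [List.foldl_nil]
    apply mapRange_congr
    intro c hc0 hcn
    rw [if_neg (by omega)]
  | succ k ih =>
    intro a b g hk h0 hg
    rw [PySem.List.pyRange_one_cons (by omega), List.foldl_cons]
    by_cases han : a < n
    · rw [if_pos ⟨han, by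
        rw [getD_mapRange g n.toNat a "" h0 (by omega)]
        exact hg a le_rfl han⟩]
      rw [setD_mapRange g n.toNat a ("I-" ++ t) h0]
      rw [ih (a + 1) b _ (by omega) (by omega) (by
        intro c hc hcn
        rw [if_neg (by omega)]
        exact hg c (by omega) hcn)]
      apply mapRange_congr
      intro c hc0 hcn
      beta_reduce
      by_cases hia : c = a
      · rw [if_neg (by omega), if_pos hia, if_pos (by omega)]
      · by_cases hcond : a + 1 ≤ c ∧ c < b ∧ c < n
        · rw [if_pos hcond, if_pos (by omega)]
        · rw [if_neg hcond, if_neg hia, if_neg (by omega)]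
    · rw [if_neg (by intro hc; exact han hc.1)]
      rw [ih (a + 1) b g (by omega) (by omega) (fun c hc hcn => hg c (by omega) hcn)]
      apply mapRange_congr
      intro c hc0 hcn
      beta_reduce
      by_cases hcond : a + 1 ≤ c ∧ c < b ∧ c < n
      · rw [if_pos hcond, if_pos (by omega)]
      · rw [if_neg hcond, if_neg (by omega)]

-- ---- A's outer loop equals selection-then-rendering, cell by cell ----

lemma mainA (n : Int) (L : List (Int × Int × String)) :
    ∀ (f : Int → String) (m lo : Int),
    List.Pairwise (fun a b : Int × Int × String => a.1 ≤ b.1) L →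
    (∀ x ∈ L, lo ≤ x.1 ∧ 0 ≤ x.1 ∧ x.1 < n) →
    (∀ c, lo ≤ c → c < n → (f c = "O" ↔ m < c)) →
    lo ≤ m + 1 →
    L.foldl (aStep n) (mapRange n.toNat f)
      = mapRange n.toNat (fun c =>
          if c ≤ m then f c else covTag c (ebKeep n (some m) L)) := by
  induction L with
  | nil =>
    intro f m lo _ _ hf hlo
    simp only [List.foldl_nil, ebKeep]
    apply mapRange_congr
    intro c hc0 hcn
    beta_reduce
    by_cases him : c ≤ m
    · rw [if_pos him]
    · rw [if_neg him]
      show f c = covTag c []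
      rw [show covTag c [] = "O" from rfl]
      exact (hf c (by omega) (by omega)).mpr (by omega)
  | cons x L' ih =>
    intro f m lo hpw hb hf hlo
    obtain ⟨s, e, t⟩ := x
    rcases hpw with _ | ⟨hx, hpw'⟩
    obtain ⟨hlos, hs0, hsn⟩ := hb (s, e, t) (List.mem_cons_self)
    have hb' : ∀ x ∈ L', s ≤ x.1 ∧ 0 ≤ x.1 ∧ x.1 < n := by
      intro y hy
      obtain ⟨_, h0, h1⟩ := hb y (List.mem_cons_of_mem _ hy)
      exact ⟨hx y hy, h0, h1⟩
    rw [List.foldl_cons]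
    have hread : PySem.List.pyGetD (mapRange n.toNat f) s "" = f s :=
      getD_mapRange f n.toNat s "" hs0 (by omega)
    by_cases hm : s ≤ m
    · -- skip: cell s is already tagged
      have hfs : f s ≠ "O" := by
        intro h
        have := (hf s hlos hsn).mp h
        omega
      have hstep : aStep n (mapRange n.toNat f) (s, e, t) = mapRange n.toNat f := by
        unfold aStep
        rw [hread, if_pos hfs]
      rw [hstep, ebKeep_cons_skip n s e t m L' hs0 hsn (by omega)]
      exact ih f m lo hpw' (fun y hy => hb y (List.mem_cons_of_mem _ hy)) hf hlo
    · -- keep: tag s with B, fill the O-cells of (s, e]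
      have hms : m < s := by omega
      have hfs : f s = "O" := (hf s hlos hsn).mpr hms
      have hstep : aStep n (mapRange n.toNat f) (s, e, t)
          = (PySem.List.pyRange (s + 1) (e + 1) 1).foldl (fun tgs i =>
              if i < n ∧ PySem.List.pyGetD tgs i "" = "O"
              then PySem.List.pySetD tgs i ("I-" ++ t) else tgs)
            (PySem.List.pySetD (mapRange n.toNat f) s ("B-" ++ t)) := by
        unfold aStep
        rw [hread, if_neg (by simp [hfs])]
      rw [hstep, setD_mapRange f n.toNat s ("B-" ++ t) hs0]
      rw [fillLemma n t (e + 1 - (s + 1)).toNat (s + 1) (e + 1)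
            (fun c => if c = s then "B-" ++ t else f c) rfl (by omega) (by
        intro c hc hcn
        beta_reduce
        rw [if_neg (by omega)]
        exact (hf c (by omega) hcn).mpr (by omega))]
      rw [ih (fun c => if s + 1 ≤ c ∧ c < e + 1 ∧ c < n then "I-" ++ t
                else if c = s then "B-" ++ t else f c) (max s e) s hpw' hb' (by
        intro c hcs hcn
        beta_reduce
        by_cases hcs' : c = s
        · subst hcs'
          rw [if_neg (by omega), if_pos rfl]
          constructor
          · intro h; exact absurd h (B_ne_O t)
          · intro h; omega
        · by_cases hce : c ≤ e
          · rw [if_pos (by omega)]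
            constructor
            · intro h; exact absurd h (I_ne_O t)
            · intro h; omega
          · rw [if_neg (by omega), if_neg hcs']
            rw [hf c (by omega) hcn]
            omega) (by omega)]
      rw [ebKeep_cons_keep n s e t m L' hs0 hsn (by omega)]
      apply mapRange_congr
      intro i hi0 hin
      beta_reduce
      by_cases him : i ≤ m
      · rw [if_pos (by omega), if_pos him, if_neg (by omega), if_neg (by omega)]
      · rw [if_neg him]
        by_cases him' : i ≤ max s e
        · rw [if_pos him']
          by_cases his : i = s
          · rw [if_neg (by omega), if_pos his, his,
              covTag_cons_self s e t (ebKeep n (some (max s e)) L')]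
          · by_cases hlt : i < s
            · rw [if_neg (by omega), if_neg his,
                covTag_cons_lt i s e t (ebKeep n (some (max s e)) L') hlt]
              exact (hf i (by omega) (by omega)).mpr (by omega)
            · have hie : i ≤ e := by omega
              rw [if_pos (by omega),
                covTag_cons_mid i s e t (ebKeep n (some (max s e)) L') (by omega) hie]
        · rw [if_neg him',
            covTag_cons_gt i s e t (ebKeep n (some (max s e)) L') (by omega) (by omega)]

-- ---- B's emission renders covTag over the remaining cells ----

lemma chainFrom_mono (n : Int) (P : List (Int × Int × String)) :
    ∀ (m m' : Int), m' ≤ m → ChainFrom n m P → ChainFrom n m' P := by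
  induction P with
  | nil => intro m m' _ _; trivial
  | cons x P' _ =>
    intro m m' hmm h
    obtain ⟨s, e, t⟩ := x
    obtain ⟨h1, h2, h3⟩ := h
    exact ⟨by omega, h2, h3⟩

lemma emitEq (n : Int) (P : List (Int × Int × String)) :
    ∀ (pos : Int), ChainFrom n (pos - 1) P →
    ebEmit n pos P = (PySem.List.pyRange pos n 1).map (fun c => covTag c P) := by
  induction P with
  | nil =>
    intro pos _
    show List.replicate (n - pos).toNat "O" = _
    rw [show (fun c => covTag c ([] : List (Int × Int × String))) = fun _ => "O" from rfl]
    rw [List.map_const', PySem.List.length_pyRange_one]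
  | cons x P' ih =>
    intro pos hch
    obtain ⟨s, e, t⟩ := x
    obtain ⟨h1, h2, h3⟩ := hch
    have hA : (PySem.List.pyRange pos s 1).map (fun c => covTag c ((s, e, t) :: P'))
        = List.replicate (s - pos).toNat "O" := by
      rw [List.map_congr_left (g := fun _ => "O") (by
        intro c hc
        rw [PySem.List.mem_pyRange_one] at hc
        exact covTag_cons_lt c s e t P' (by omega))]
      rw [List.map_const', PySem.List.length_pyRange_one]
    have hC : (PySem.List.pyRange (s + 1) (max s (min e (n - 1)) + 1) 1).map
          (fun c => covTag c ((s, e, t) :: P'))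
        = List.replicate (min e (n - 1) - s).toNat ("I-" ++ t) := by
      rw [List.map_congr_left (g := fun _ => "I-" ++ t) (by
        intro c hc
        rw [PySem.List.mem_pyRange_one] at hc
        exact covTag_cons_mid c s e t P' (by omega) (by omega))]
      rw [List.map_const', PySem.List.length_pyRange_one]
      congr 1
      omega
    have hD : (PySem.List.pyRange (max s (min e (n - 1)) + 1) n 1).map
          (fun c => covTag c ((s, e, t) :: P'))
        = ebEmit n (max s (min e (n - 1)) + 1) P' := by
      rw [ih (max s (min e (n - 1)) + 1) (chainFrom_mono n P' (max s e) _ (by omega) h3)]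
      apply List.map_congr_left
      intro c hc
      rw [PySem.List.mem_pyRange_one] at hc
      exact covTag_cons_gt c s e t P' (by omega) (by omega)
    rw [PySem.List.pyRange_one_append pos s n (by omega) (by omega),
        PySem.List.pyRange_one_append s (s + 1) n (by omega) (by omega),
        PySem.List.pyRange_one_append (s + 1) (max s (min e (n - 1)) + 1) n
          (by omega) (by omega),
        PySem.List.pyRange_one_singleton]
    simp only [List.map_append, List.map_cons, List.map_nil]
    rw [hA, hC, hD, covTag_cons_self s e t P']
    show List.replicate (s - pos).toNat "O"
        ++ ("B-" ++ t) :: List.replicate (min e (n - 1) - s).toNat ("I-" ++ t)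
        ++ ebEmit n (max s (min e (n - 1)) + 1) P' = _
    simp

lemma ebKeep_none_eq (n : Int) (L : List (Int × Int × String))
    (h : ∀ x ∈ L, 0 ≤ x.1 ∧ x.1 < n) :
    ebKeep n none L = ebKeep n (some (-1)) L := by
  cases L with
  | nil => rfl
  | cons x rest =>
    obtain ⟨h0, h1⟩ := h x List.mem_cons_self
    show (if 0 ≤ x.1 ∧ x.1 < n then x :: ebKeep n (some (max x.1 x.2.1)) rest
        else ebKeep n none rest) = _
    rw [if_pos ⟨h0, h1⟩]
    obtain ⟨s, e, t⟩ := x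
    rw [ebKeep_cons_keep n s e t (-1) rest h0 h1 (by omega)]

lemma chain_ebKeep (n : Int) (L : List (Int × Int × String)) :
    ∀ (m : Int), List.Pairwise (fun a b : Int × Int × String => a.1 ≤ b.1) L →
    (∀ x ∈ L, 0 ≤ x.1 ∧ x.1 < n) → ChainFrom n m (ebKeep n (some m) L) := by
  induction L with
  | nil => intro m _ _; trivial
  | cons x L' ih =>
    intro m hpw hb
    rcases hpw with _ | ⟨hx, hpw'⟩
    obtain ⟨s, e, t⟩ := x
    obtain ⟨h0, h1⟩ := hb (s, e, t) List.mem_cons_self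
    by_cases hxm : m < s
    · rw [ebKeep_cons_keep n s e t m L' h0 h1 hxm]
      exact ⟨hxm, h1, ih (max s e) hpw'
        (fun y hy => hb y (List.mem_cons_of_mem _ hy))⟩
    · rw [ebKeep_cons_skip n s e t m L' h0 h1 hxm]
      exact ih m hpw' (fun y hy => hb y (List.mem_cons_of_mem _ hy))

-- ===== VERDICT (by name: the statement is the Claim_ definition above) =====
lemma portB_eq (n : Int) (ents : List (Int × Int × String)) :
    entities_to_bio_py_alt n ents
      = ebEmit n 0 (ebKeep n none
          (PySem.List.sorted2 ents (fun x => x.1) (fun x => -(x.2.1 - x.1)))) := rfl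

theorem entities_to_bio_py_spec : Claim_equal_entities_to_bio_py := by
  intro n ents _hD hPre
  show entities_to_bio_py n ents = entities_to_bio_py_alt n ents
  have hpw := sorted2_pairwise_start ents
  have hmemS : ∀ x ∈ PySem.List.sorted2 ents (fun x => x.1) (fun x => -(x.2.1 - x.1)), x ∈ ents :=
    fun x hx => (PySem.List.sorted2_perm ents _ _ false).mem_iff.mp hx
  have hb : ∀ x ∈ PySem.List.sorted2 ents (fun x => x.1) (fun x => -(x.2.1 - x.1)),
      0 ≤ x.1 ∧ x.1 < n := fun x hx => hPre x (hmemS x hx)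
  -- A's side
  rw [portA_eq, replicate_eq_mapRange]
  rw [mainA n _ (fun _ => "O") (-1) 0 hpw
      (fun x hx => ⟨(hb x hx).1, (hb x hx).1, (hb x hx).2⟩)
      (fun c hc _ => ⟨fun _ => by omega, fun _ => rfl⟩) (by omega)]
  -- B's side
  rw [portB_eq]
  rw [ebKeep_none_eq n _ hb]
  rw [emitEq n _ 0 (by
    simpa using chain_ebKeep n _ (-1) hpw hb)]
  rw [PySem.List.pyRange_one 0 n, List.map_map]
  unfold mapRange
  simp only [Int.sub_zero, Function.comp_def, zero_add]
  apply List.map_congr_left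
  intro i hi
  simp only [List.mem_range] at hi
  beta_reduce
  rw [if_neg (by omega)]
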